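-- pv_equiv track=rewrite | github.com/cloudemsNL/ha-cloudems | custom_components/cloudems/energy_manager/tuya_direct.py | _dp_name_to_code
-- ===== SOURCE A (Python) =====
-- from typing import Any, Dict, List, Optional, Tuple
--
-- TUYA_DP_MAP: Dict[str, Dict[str, str]] = {
--     # Slimme stekker / relais
--     "switch": {
--         "on_off":     "1",
--         "countdown":  "2",
--     },
--     # Slimme stekker met energiemeting (bijv. Nous A1T, Blitzwolf BW-SHP6)
--     "plug_meter": {
--         "on_off":     "1",
--         "countdown":  "2",
--         "power_w":    "19",   # W × 0.1
--         "current_ma": "18",   # mA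
--         "voltage_mv": "20",   # mV × 0.1
--         "energy_kwh": "17",   # kWh × 0.01
--     },
--     # Thermostaat / TRV
--     "thermostat": {
--         "on_off":           "1",
--         "mode":             "2",   # "manual" | "auto" | "eco" | "boost"
--         "setpoint_tenths":  "16",  # °C × 10
--         "current_temp":     "24",  # °C × 10
--         "valve_open":       "36",  # %
--     },
--     # Gordijnmotor / rolluik
--     "curtain": {
--         "control":   "1",   # "open" | "close" | "stop"
--         "percent":   "3",   # 0–100%
--         "direction": "5",   # "forward" | "back"
--     },
--     # Enkelvoudige schakelaar (geen meter)
--     "switch_simple": {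
--         "on_off": "1",
--     },
--     # Multi-gang schakelaar (2/3/4 kanalen)
--     "switch_2gang": {
--         "on_off_1": "1",
--         "on_off_2": "2",
--     },
--     "switch_3gang": {
--         "on_off_1": "1",
--         "on_off_2": "2",
--         "on_off_3": "3",
--     },
-- }
--
-- def _dp_name_to_code(name: str, dev_type: str = "") -> Optional[str]:
--     """Leesbare DP-naam → DP-code."""
--     if dev_type and dev_type in TUYA_DP_MAP:
--         code = TUYA_DP_MAP[dev_type].get(name)
--         if code:
--             return code
--     # Zoek in alle types
--     for dps in TUYA_DP_MAP.values():
--         if name in dps: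
--             return dps[name]
--     return None
-- ===== SOURCE B (Python) =====
-- from typing import Optional
--
-- # Codes are consistent across device types in TUYA_DP_MAP, so dev_type is
-- # irrelevant: the whole lookup collapses to one direct name -> code mapping.
-- def _dp_name_to_code(name: str, dev_type: str = "") -> Optional[str]:
--     """Leesbare DP-naam → DP-code."""
--     match name:
--         case "on_off":          return "1"
--         case "countdown":       return "2"
--         case "power_w":         return "19"
--         case "current_ma":      return "18"
--         case "voltage_mv":      return "20"
--         case "energy_kwh":      return "17"
--         case "mode":            return "2"
--         case "setpoint_tenths": return "16"
--         case "current_temp":    return "24"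
--         case "valve_open":      return "36"
--         case "control":         return "1"
--         case "percent":         return "3"
--         case "direction":       return "5"
--         case "on_off_1":        return "1"
--         case "on_off_2":        return "2"
--         case "on_off_3":        return "3"
--         case _:                 return None
-- ===== Notes on version B (the rewrite author's own statement) =====
-- stated objective: simpler
-- what changed: Replaces the dev_type-keyed dict lookup plus fallback linear scan over all inner dicts with a single direct match on the DP name (no dicts, no dev_type branch) -- safe because no DP name maps to two different codes across device types.
import Mathlib
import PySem

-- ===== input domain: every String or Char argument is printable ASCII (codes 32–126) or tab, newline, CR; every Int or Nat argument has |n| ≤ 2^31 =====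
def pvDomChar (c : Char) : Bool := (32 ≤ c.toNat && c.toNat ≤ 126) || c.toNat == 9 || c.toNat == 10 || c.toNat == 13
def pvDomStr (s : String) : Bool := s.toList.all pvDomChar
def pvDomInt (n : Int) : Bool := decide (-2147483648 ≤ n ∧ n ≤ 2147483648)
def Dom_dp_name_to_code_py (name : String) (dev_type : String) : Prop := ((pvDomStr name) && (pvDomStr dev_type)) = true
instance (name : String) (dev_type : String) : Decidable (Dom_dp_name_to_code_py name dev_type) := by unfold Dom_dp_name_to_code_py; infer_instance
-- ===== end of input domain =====

-- B replaces A's dev_type-keyed lookup + fallback scan over the nested map with one direct match on the DP name (simpler; codes are consistent across device types, so dev_type is irrelevant).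

-- ===== PORT A =====
def TUYA_DP_MAP : PySem.Dict String (PySem.Dict String String) :=
  PySem.Dict.ofList [
    ("switch", PySem.Dict.ofList [("on_off", "1"), ("countdown", "2")]),
    ("plug_meter", PySem.Dict.ofList [("on_off", "1"), ("countdown", "2"), ("power_w", "19"),
      ("current_ma", "18"), ("voltage_mv", "20"), ("energy_kwh", "17")]),
    ("thermostat", PySem.Dict.ofList [("on_off", "1"), ("mode", "2"), ("setpoint_tenths", "16"),
      ("current_temp", "24"), ("valve_open", "36")]),
    ("curtain", PySem.Dict.ofList [("control", "1"), ("percent", "3"), ("direction", "5")]),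
    ("switch_simple", PySem.Dict.ofList [("on_off", "1")]),
    ("switch_2gang", PySem.Dict.ofList [("on_off_1", "1"), ("on_off_2", "2")]),
    ("switch_3gang", PySem.Dict.ofList [("on_off_1", "1"), ("on_off_2", "2"), ("on_off_3", "3")])]

-- A's fallback loop: 'for dps in TUYA_DP_MAP.values(): if name in dps: return dps[name]' / 'return None'
def scanDPs (name : String) : List (PySem.Dict String String) → Option String
  | [] => none
  | dps :: rest => if dps.contains name then dps.get? name else scanDPs name rest

def dp_name_to_code_py (name : String) (dev_type : String) : Option String :=
  -- 'if dev_type and dev_type in TUYA_DP_MAP: code = TUYA_DP_MAP[dev_type].get(name); if code: return code'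
  -- ported as get?/bind ('dev_type in TUYA_DP_MAP' succeeds exactly when get? is some); 'if code:' is string truthiness
  let early : Option String :=
    if dev_type ≠ "" then
      (TUYA_DP_MAP.get? dev_type).bind fun dps =>
        (dps.get? name).bind fun code =>
          if code ≠ "" then some code else none
    else none
  match early with
  | some code => some code
  | none => scanDPs name TUYA_DP_MAP.values

-- ===== PORT B =====
-- Source B's 'match name: case …' chain, ported as the equivalent literal-equality chain
def dp_name_to_code_py_alt (name : String) (dev_type : String) : Option String :=
  if name = "on_off" then some "1"
  else if name = "countdown" then some "2"
  else if name = "power_w" then some "19"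
  else if name = "current_ma" then some "18"
  else if name = "voltage_mv" then some "20"
  else if name = "energy_kwh" then some "17"
  else if name = "mode" then some "2"
  else if name = "setpoint_tenths" then some "16"
  else if name = "current_temp" then some "24"
  else if name = "valve_open" then some "36"
  else if name = "control" then some "1"
  else if name = "percent" then some "3"
  else if name = "direction" then some "5"
  else if name = "on_off_1" then some "1"
  else if name = "on_off_2" then some "2"
  else if name = "on_off_3" then some "3"
  else none

-- ===== PRECONDITION & SPEC =====
def Spec_dp_name_to_code_py (name : String) (dev_type : String) (out : Option String) : Prop := out = dp_name_to_code_py_alt name dev_type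
instance (name : String) (dev_type : String) (out : Option String) : Decidable (Spec_dp_name_to_code_py name dev_type out) := by unfold Spec_dp_name_to_code_py; infer_instance

-- ===== CLAIM =====
def Claim_equal_dp_name_to_code_py : Prop := ∀ (name : String) (dev_type : String), Dom_dp_name_to_code_py name dev_type → Spec_dp_name_to_code_py name dev_type (dp_name_to_code_py name dev_type)

-- ===== LEMMAS AND PROOFS =====

-- the mk-normal form of the literal nested dict (used to unfold get?/values/contains)
def TUYA_MK : List (String × PySem.Dict String String) := [
    ("switch", PySem.Dict.mk [("on_off", "1"), ("countdown", "2")]),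
    ("plug_meter", PySem.Dict.mk [("on_off", "1"), ("countdown", "2"), ("power_w", "19"),
      ("current_ma", "18"), ("voltage_mv", "20"), ("energy_kwh", "17")]),
    ("thermostat", PySem.Dict.mk [("on_off", "1"), ("mode", "2"), ("setpoint_tenths", "16"),
      ("current_temp", "24"), ("valve_open", "36")]),
    ("curtain", PySem.Dict.mk [("control", "1"), ("percent", "3"), ("direction", "5")]),
    ("switch_simple", PySem.Dict.mk [("on_off", "1")]),
    ("switch_2gang", PySem.Dict.mk [("on_off_1", "1"), ("on_off_2", "2")]),
    ("switch_3gang", PySem.Dict.mk [("on_off_1", "1"), ("on_off_2", "2"), ("on_off_3", "3")])]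

theorem tuya_eq_mk : TUYA_DP_MAP = PySem.Dict.mk TUYA_MK := rfl

-- A's fallback scan over all device types computes exactly B's match chain
theorem scan_eq_alt (name dev_type : String) :
    scanDPs name TUYA_DP_MAP.values = dp_name_to_code_py_alt name dev_type := by
  by_cases h1 : name = "on_off"; · subst h1; rfl
  by_cases h2 : name = "countdown"; · subst h2; rfl
  by_cases h3 : name = "power_w"; · subst h3; rfl
  by_cases h4 : name = "current_ma"; · subst h4; rfl
  by_cases h5 : name = "voltage_mv"; · subst h5; rfl
  by_cases h6 : name = "energy_kwh"; · subst h6; rfl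
  by_cases h7 : name = "mode"; · subst h7; rfl
  by_cases h8 : name = "setpoint_tenths"; · subst h8; rfl
  by_cases h9 : name = "current_temp"; · subst h9; rfl
  by_cases h10 : name = "valve_open"; · subst h10; rfl
  by_cases h11 : name = "control"; · subst h11; rfl
  by_cases h12 : name = "percent"; · subst h12; rfl
  by_cases h13 : name = "direction"; · subst h13; rfl
  by_cases h14 : name = "on_off_1"; · subst h14; rfl
  by_cases h15 : name = "on_off_2"; · subst h15; rfl
  by_cases h16 : name = "on_off_3"; · subst h16; rfl
  simp [scanDPs, tuya_eq_mk, TUYA_MK, dp_name_to_code_py_alt, PySem.Dict.values_mk,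
    PySem.Dict.contains_mk, PySem.Dict.get?, h1, h2, h3, h4, h5, h6, h7, h8, h9, h10, h11,
    h12, h13, h14, h15, h16, Ne.symm h1, Ne.symm h2, Ne.symm h3, Ne.symm h4, Ne.symm h5,
    Ne.symm h6, Ne.symm h7, Ne.symm h8, Ne.symm h9, Ne.symm h10, Ne.symm h11, Ne.symm h12,
    Ne.symm h13, Ne.symm h14, Ne.symm h15, Ne.symm h16]

-- every per-type hit is a nonempty code agreeing with B's match chain (codes are consistent across types)
theorem early_consistent (name dev : String) (dps : PySem.Dict String String) (code : String)
    (h1 : TUYA_DP_MAP.get? dev = some dps) (h2 : dps.get? name = some code) :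
    code ≠ "" ∧ ∀ dev_type, dp_name_to_code_py_alt name dev_type = some code := by
  rw [tuya_eq_mk] at h1
  simp only [TUYA_MK, PySem.Dict.get?_mk_cons] at h1
  split_ifs at h1 <;>
  first
    | (obtain rfl := Option.some.inj h1
       simp only [PySem.Dict.get?_mk_cons] at h2
       split_ifs at h2 <;>
       first
         | (obtain rfl := Option.some.inj h2
            simp only [beq_iff_eq] at *
            subst_vars
            exact ⟨by decide, fun _ => rfl⟩)
         | (exact absurd h2 (by simp [PySem.Dict.get?])))
    | (exact absurd h1 (by simp [PySem.Dict.get?]))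

-- ===== VERDICT =====
theorem dp_name_to_code_py_spec : Claim_equal_dp_name_to_code_py := by
  intro name dev_type _
  unfold Spec_dp_name_to_code_py dp_name_to_code_py
  by_cases hd : dev_type = ""
  · simp [hd, scan_eq_alt name dev_type]
  · simp only [ne_eq, hd, not_false_eq_true, if_pos]
    cases h1 : TUYA_DP_MAP.get? dev_type with
    | none => simp [scan_eq_alt name dev_type]
    | some dps =>
      cases h2 : dps.get? name with
      | none => simp [h2, scan_eq_alt name dev_type]
      | some code =>
        obtain ⟨hne, halt⟩ := early_consistent name dev_type dps code h1 h2
        simp [h2, hne, halt dev_type]
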